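-- pv_equiv track=rewrite | github.com/RamkaTheRacist/python-RTR | PY_les5_s/HW/task2.py | botIAEnable
-- ===== SOURCE A (Python) =====
-- def botIAEnable(number: int) -> int:
--     count = 0
--     if(number > 57):
--         while(number > 57):
--             count += 1
--             number -= 1
--             if(count == 29):
--                 count -= 1
--                 break
--     elif(57 > number > 29):
--         while(number > 29):
--             count += 1
--             number -= 1
--             if(count == 29):
--                 count -= 1
--                 break
--     else:
--         count = number
--     return count
-- ===== SOURCE B (Python) =====
-- def botIAEnable(number: int) -> int:
--     if number > 57:
--         return min(number - 57, 28)
--     elif 57 > number > 29: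
--         return number - 29
--     else:
--         return number
-- ===== Notes on version B (the rewrite author's own statement) =====
-- stated objective: simpler
-- what changed: Replaced both capped decrement while-loops by their closed-form arithmetic results (min(number-57,28) and number-29).
import Mathlib
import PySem

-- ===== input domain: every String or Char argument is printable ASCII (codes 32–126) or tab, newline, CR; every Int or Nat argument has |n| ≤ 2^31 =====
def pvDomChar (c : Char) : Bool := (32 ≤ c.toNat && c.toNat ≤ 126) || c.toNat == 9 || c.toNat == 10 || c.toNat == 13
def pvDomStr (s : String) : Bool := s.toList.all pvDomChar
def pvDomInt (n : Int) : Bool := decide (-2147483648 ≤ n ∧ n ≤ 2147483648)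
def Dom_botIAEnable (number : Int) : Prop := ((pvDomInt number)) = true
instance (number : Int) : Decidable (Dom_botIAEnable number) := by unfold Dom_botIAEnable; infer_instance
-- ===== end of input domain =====

-- B replaces A's capped decrement while-loops with their closed-form arithmetic values (objective: simpler).

-- ===== PORT A =====
-- while(number > 57): count += 1; number -= 1; if count == 29: count -= 1; break
def botIAEnableLoop1 (number count : Int) : Int :=
  if h : number > 57 then
    if count + 1 == 29 then (count + 1) - 1
    else botIAEnableLoop1 (number - 1) (count + 1)
  else count
termination_by (number - 57).toNat
decreasing_by omega

-- while(number > 29): same body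
def botIAEnableLoop2 (number count : Int) : Int :=
  if h : number > 29 then
    if count + 1 == 29 then (count + 1) - 1
    else botIAEnableLoop2 (number - 1) (count + 1)
  else count
termination_by (number - 29).toNat
decreasing_by omega

def botIAEnable (number : Int) : Int :=
  if number > 57 then botIAEnableLoop1 number 0
  else if 57 > number ∧ number > 29 then botIAEnableLoop2 number 0
  else number

-- ===== PORT B =====
def botIAEnable_alt (number : Int) : Int :=
  if number > 57 then min (number - 57) 28
  else if 57 > number ∧ number > 29 then number - 29
  else number

-- ===== PRECONDITION & SPEC =====
def Spec_botIAEnable (number : Int) (out : Int) : Prop := out = botIAEnable_alt number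
instance (number : Int) (out : Int) : Decidable (Spec_botIAEnable number out) := by unfold Spec_botIAEnable; infer_instance

-- ===== CLAIM (what is proved, stated in full; the proofs are below) =====
def Claim_equal_botIAEnable : Prop := ∀ (number : Int), Dom_botIAEnable number → Spec_botIAEnable number (botIAEnable number)

-- ===== LEMMAS AND PROOFS =====
theorem botIAEnableLoop1_eq (number count : Int) (h : 0 ≤ count) (hc : count < 29) :
    botIAEnableLoop1 number count = if number > 57 then min (number - 57 + count) 28 else count := by
  induction number, count using botIAEnableLoop1.induct with
  | case1 n c hgt htop =>
      rw [botIAEnableLoop1]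
      have hc29 : c + 1 = 29 := by simpa using htop
      rw [if_pos hgt, min_def]
      split_ifs <;> omega
  | case2 n c hgt htop ih =>
      rw [botIAEnableLoop1]
      have hne : ¬ (c + 1 = 29) := by simpa using htop
      simp only [dif_pos hgt, if_neg (by simpa using htop)]
      rw [ih (by omega) (by omega)]
      by_cases h2 : n - 1 > 57 <;> simp [h2, if_pos hgt] <;> omega
  | case3 n c hle =>
      rw [botIAEnableLoop1]
      simp [hle]

theorem botIAEnableLoop2_eq (number count : Int) (h : 0 ≤ count)
    (hb : number + count < 58) :
    botIAEnableLoop2 number count = if number > 29 then number - 29 + count else count := by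
  induction number, count using botIAEnableLoop2.induct with
  | case1 n c hgt htop =>
      have hc29 : c + 1 = 29 := by simpa using htop
      omega
  | case2 n c hgt htop ih =>
      rw [botIAEnableLoop2]
      simp only [dif_pos hgt, if_neg (by simpa using htop)]
      rw [ih (by omega) (by omega)]
      by_cases h2 : n - 1 > 29 <;> simp [h2, if_pos hgt] <;> omega
  | case3 n c hle =>
      rw [botIAEnableLoop2]
      simp [hle]

-- ===== VERDICT =====
theorem botIAEnable_spec : Claim_equal_botIAEnable := by
  intro number _
  unfold Spec_botIAEnable botIAEnable botIAEnable_alt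
  by_cases h1 : number > 57
  · rw [if_pos h1, if_pos h1, botIAEnableLoop1_eq number 0 (by omega) (by omega)]
    simp [h1]
  · rw [if_neg h1, if_neg h1]
    by_cases h2 : 57 > number ∧ number > 29
    · rw [if_pos h2, if_pos h2, botIAEnableLoop2_eq number 0 (by omega) (by omega)]
      simp [h2.2]
    · rw [if_neg h2, if_neg h2]
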